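-- pv_equiv track=rewrite | github.com/283938162/TensorFlow | ExcelProject/update_manager_task_detail_day.py | getReasonSuggestMergeDate
-- ===== SOURCE A (Python) =====
-- def getReasonSuggestMergeDate(reasonSuggestMatch):
--     rsDict = {}
--     for x in reasonSuggestMatch:
--         dhList = []
--         reason = x[4]
--         suggest = x[3]
--         date = x[0]
--         hour = x[1]
--         rs = (reason, suggest)
--
--         if rs not in rsDict:
--             dhList.append(date + ':' + hour)
--             rsDict[rs] = dhList
--         else:
--             if date in rsDict[rs][0]:
--                 if 'AllDay' not in rsDict[rs][0]:
--                     rsDict[rs][0] = rsDict[rs][0] + (',' + hour)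
--             else:
--                 rsDict[rs][0] = rsDict[rs][0] + (';' + date + ':' + hour)
--     return rsDict
-- ===== SOURCE B (Python) =====
-- def _merge(pairs):
--     date0, hour0 = pairs[0]
--     acc = date0 + ':' + hour0
--     for date, hour in pairs[1:]:
--         if date in acc:
--             if 'AllDay' not in acc:
--                 acc = acc + ',' + hour
--         else:
--             acc = acc + ';' + date + ':' + hour
--     return acc
--
--
-- def getReasonSuggestMergeDate(reasonSuggestMatch):
--     groups = {}
--     for x in reasonSuggestMatch:
--         key = (x[4], x[3])
--         groups[key] = groups.get(key, []) + [(x[0], x[1])]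
--     return {key: [_merge(pairs)] for key, pairs in groups.items()}
-- ===== Notes on version B (the rewrite author's own statement) =====
-- stated objective: alternative
-- what changed: B first groups the rows into a dict mapping (reason,suggest) to its ordered (date,hour) pairs, then in a second pass folds each group into its merged 'date:hour' string, instead of A's single pass that rewrites the accumulated string inside the result dict at every row.
import Mathlib
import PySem

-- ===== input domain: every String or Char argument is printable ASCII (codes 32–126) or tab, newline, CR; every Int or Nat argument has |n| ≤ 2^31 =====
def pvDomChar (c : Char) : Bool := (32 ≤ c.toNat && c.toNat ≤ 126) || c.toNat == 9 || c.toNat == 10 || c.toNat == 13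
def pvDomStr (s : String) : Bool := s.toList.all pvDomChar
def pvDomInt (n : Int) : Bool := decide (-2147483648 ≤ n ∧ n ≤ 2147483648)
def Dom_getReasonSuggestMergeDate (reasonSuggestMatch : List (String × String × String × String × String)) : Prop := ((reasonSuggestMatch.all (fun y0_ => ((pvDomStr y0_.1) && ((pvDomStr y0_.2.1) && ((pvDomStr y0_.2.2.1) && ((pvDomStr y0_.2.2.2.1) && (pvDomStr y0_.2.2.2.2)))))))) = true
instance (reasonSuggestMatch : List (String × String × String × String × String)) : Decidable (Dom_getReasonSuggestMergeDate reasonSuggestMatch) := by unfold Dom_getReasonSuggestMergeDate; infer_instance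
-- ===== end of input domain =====

-- B replaces A's single pass that rewrites the accumulated string inside the result dict at every
-- row by a grouping pass (key -> ordered (date,hour) pairs) followed by a fold of each group into
-- its merged string (objective: alternative decomposition; same cost).

-- ===== PORT A =====
-- Literal transliteration of A: one dict, each row either inserts a fresh one-element list
-- ["date:hour"] or rewrites element 0 of the stored list in place.
def getReasonSuggestMergeDate (reasonSuggestMatch : List (String × String × String × String × String)) : List (String × String × List String) :=
  let rsDict : PySem.Dict (String × String) (List String) :=
    reasonSuggestMatch.foldl (fun rsDict x =>
      let reason := x.2.2.2.2
      let suggest := x.2.2.2.1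
      let date := x.1
      let hour := x.2.1
      let rs := (reason, suggest)
      -- 'if rs not in rsDict' ported as a match on get?; in the member branch the Python reads
      -- rsDict[rs][0], ported as l.headD "" (the stored list is never empty, so headD is exact)
      match rsDict.get? rs with
      | none => rsDict.insert rs ([] ++ [date ++ ":" ++ hour])
      | some l =>
        let cur := l.headD ""
        if PySem.Str.isIn date cur then
          if PySem.Str.isIn "AllDay" cur then rsDict
          else rsDict.insert rs (l.set 0 (cur ++ ("," ++ hour)))
        else rsDict.insert rs (l.set 0 (cur ++ (";" ++ date ++ ":" ++ hour)))
      ) PySem.Dict.empty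
  rsDict.items.map (fun p => (p.1.1, p.1.2, p.2))

-- ===== PORT B =====
def pvMergeStep (acc date hour : String) : String :=
  if PySem.Str.isIn date acc then
    if PySem.Str.isIn "AllDay" acc then acc
    else acc ++ "," ++ hour
  else acc ++ ";" ++ date ++ ":" ++ hour

-- Source B's _merge: seed with the first pair, fold the rest ([] is unreachable: groups are nonempty)
def pvMergeGroup : List (String × String) → String
  | [] => ""
  | (d, h) :: rest => rest.foldl (fun acc p => pvMergeStep acc p.1 p.2) (d ++ ":" ++ h)

def getReasonSuggestMergeDate_alt (reasonSuggestMatch : List (String × String × String × String × String)) : List (String × String × List String) :=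
  let groups : PySem.Dict (String × String) (List (String × String)) :=
    reasonSuggestMatch.foldl (fun g x =>
      let key := (x.2.2.2.2, x.2.2.2.1)
      g.insert key (g.getD key [] ++ [(x.1, x.2.1)])) PySem.Dict.empty
  groups.items.map (fun p => (p.1.1, p.1.2, [pvMergeGroup p.2]))

-- ===== PRECONDITION & SPEC =====
def Spec_getReasonSuggestMergeDate (reasonSuggestMatch : List (String × String × String × String × String)) (out : List (String × String × List String)) : Prop := out = getReasonSuggestMergeDate_alt reasonSuggestMatch
instance (reasonSuggestMatch : List (String × String × String × String × String)) (out : List (String × String × List String)) : Decidable (Spec_getReasonSuggestMergeDate reasonSuggestMatch out) := by unfold Spec_getReasonSuggestMergeDate; infer_instance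

-- ===== CLAIM (what is proved, stated in full; the proofs are below) =====
def Claim_equal_getReasonSuggestMergeDate : Prop := ∀ (reasonSuggestMatch : List (String × String × String × String × String)), Dom_getReasonSuggestMergeDate reasonSuggestMatch → Spec_getReasonSuggestMergeDate reasonSuggestMatch (getReasonSuggestMergeDate reasonSuggestMatch)

-- ===== LEMMAS AND PROOFS =====

-- A's loop body and B's loop body, named for the proofs (definitionally the ports' lambdas)
def pvStepA (rsDict : PySem.Dict (String × String) (List String)) (x : String × String × String × String × String) : PySem.Dict (String × String) (List String) :=
  let reason := x.2.2.2.2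
  let suggest := x.2.2.2.1
  let date := x.1
  let hour := x.2.1
  let rs := (reason, suggest)
  match rsDict.get? rs with
  | none => rsDict.insert rs ([] ++ [date ++ ":" ++ hour])
  | some l =>
    let cur := l.headD ""
    if PySem.Str.isIn date cur then
      if PySem.Str.isIn "AllDay" cur then rsDict
      else rsDict.insert rs (l.set 0 (cur ++ ("," ++ hour)))
    else rsDict.insert rs (l.set 0 (cur ++ (";" ++ date ++ ":" ++ hour)))

def pvStepB (g : PySem.Dict (String × String) (List (String × String))) (x : String × String × String × String × String) : PySem.Dict (String × String) (List (String × String)) :=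
  let key := (x.2.2.2.2, x.2.2.2.1)
  g.insert key (g.getD key [] ++ [(x.1, x.2.1)])

-- the image of B's grouping state under "merge each group": A's state
def pvImg (g : PySem.Dict (String × String) (List (String × String))) : PySem.Dict (String × String) (List String) :=
  PySem.Dict.mk (g.items.map (fun p => (p.1, [pvMergeGroup p.2])))

lemma pvGet?_mk_map (l : List ((String × String) × List (String × String))) (k : String × String) :
    (PySem.Dict.mk (l.map (fun p => (p.1, [pvMergeGroup p.2])))).get? k
      = ((PySem.Dict.mk l).get? k).map (fun v => [pvMergeGroup v]) := by
  induction l with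
  | nil => rfl
  | cons p rest ih =>
      rw [List.map_cons, PySem.Dict.get?_mk_cons, PySem.Dict.get?_mk_cons]
      split <;> simp [ih]

lemma pvGet?_img (g : PySem.Dict (String × String) (List (String × String))) (k : String × String) :
    (pvImg g).get? k = (g.get? k).map (fun v => [pvMergeGroup v]) := by
  have := pvGet?_mk_map g.items k
  simpa [pvImg] using this

lemma pvContains_img (g : PySem.Dict (String × String) (List (String × String))) (k : String × String) :
    (pvImg g).contains k = g.contains k := by
  rw [PySem.Dict.contains_eq_isSome_get?, PySem.Dict.contains_eq_isSome_get?, pvGet?_img]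
  cases g.get? k <;> rfl

lemma pvMergeGroup_append (v : List (String × String)) (hv : v ≠ []) (d h : String) :
    pvMergeGroup (v ++ [(d, h)]) = pvMergeStep (pvMergeGroup v) d h := by
  cases v with
  | nil => exact absurd rfl hv
  | cons p rest => cases p; simp [pvMergeGroup, List.foldl_append]

lemma pvMain (rows : List (String × String × String × String × String))
    (g : PySem.Dict (String × String) (List (String × String)))
    (hnd : g.keys.Nodup) (hne : ∀ k v, g.get? k = some v → v ≠ []) :
    rows.foldl pvStepA (pvImg g) = pvImg (rows.foldl pvStepB g) := by
  induction rows generalizing g with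
  | nil => rfl
  | cons x rows ih =>
      obtain ⟨d, hr, z, s, r⟩ := x
      have hstep : pvStepA (pvImg g) (d, hr, z, s, r) = pvImg (pvStepB g (d, hr, z, s, r)) := by
        cases hg : g.get? (r, s) with
        | none =>
            have hc : g.contains (r, s) = false := by
              rw [PySem.Dict.contains_eq_isSome_get?, hg]; rfl
            have hci : (pvImg g).contains (r, s) = false := by rw [pvContains_img]; exact hc
            have hgi : (pvImg g).get? (r, s) = none := by rw [pvGet?_img, hg]; rfl
            apply PySem.Dict.ext
            simp only [pvStepA, pvStepB, hgi, hg, PySem.Dict.getD_eq_get?_getD, Option.getD_none]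
            rw [show (pvImg (g.insert (r, s) ([] ++ [(d, hr)]))).items
                  = (g.insert (r, s) ([] ++ [(d, hr)])).items.map (fun p => (p.1, [pvMergeGroup p.2])) from rfl,
                PySem.Dict.items_insert_of_not_contains _ _ hci,
                PySem.Dict.items_insert_of_not_contains _ _ hc]
            simp [pvImg, pvMergeGroup]
        | some v =>
            have hv : v ≠ [] := hne _ _ hg
            have hc : g.contains (r, s) = true := by
              rw [PySem.Dict.contains_eq_isSome_get?, hg]; rfl
            have hci : (pvImg g).contains (r, s) = true := by rw [pvContains_img]; exact hc
            have hgi : (pvImg g).get? (r, s) = some [pvMergeGroup v] := by rw [pvGet?_img, hg]; rfl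
            have helem : ∀ p ∈ g.items, (p.1 == (r, s)) = true → p.2 = v := by
              intro p hp hpk
              have h1 : g.get? p.1 = some p.2 := by
                refine PySem.Dict.get?_of_mem_items g ?_ hnd
                simpa using hp
              rw [eq_of_beq hpk, hg] at h1
              exact (Option.some_inj.mp h1).symm
            apply PySem.Dict.ext
            simp only [pvStepA, pvStepB, hgi, hg, PySem.Dict.getD_eq_get?_getD, Option.getD_some,
              List.headD_cons]
            rw [show (pvImg (g.insert (r, s) (v ++ [(d, hr)]))).items
                  = (g.insert (r, s) (v ++ [(d, hr)])).items.map (fun p => (p.1, [pvMergeGroup p.2])) from rfl,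
                PySem.Dict.items_insert_of_contains _ _ hc, List.map_map]
            by_cases hin : PySem.Str.isIn d (pvMergeGroup v) = true
            · by_cases hall : PySem.Str.isIn "AllDay" (pvMergeGroup v) = true
              · -- A leaves the dict unchanged; the merged string of the grown group is unchanged too
                have hms : pvMergeStep (pvMergeGroup v) d hr = pvMergeGroup v := by
                  unfold pvMergeStep; rw [if_pos hin, if_pos hall]
                rw [if_pos hin, if_pos hall,
                  show (pvImg g).items = g.items.map (fun p => (p.1, [pvMergeGroup p.2])) from rfl]
                refine List.map_congr_left ?_
                intro p hp
                by_cases hpk : (p.1 == (r, s)) = true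
                · have h2 := helem p hp hpk
                  simp [eq_of_beq hpk, pvMergeGroup_append v hv, hms, h2]
                · have hp1 : p.1 ≠ (r, s) := fun h => hpk (by simp [h])
                  simp [hp1]
              · have hms : pvMergeStep (pvMergeGroup v) d hr = pvMergeGroup v ++ ("," ++ hr) := by
                  unfold pvMergeStep
                  rw [if_pos hin, if_neg hall, String.append_assoc]
                rw [if_pos hin, if_neg hall, PySem.Dict.items_insert_of_contains _ _ hci,
                  show (pvImg g).items = g.items.map (fun p => (p.1, [pvMergeGroup p.2])) from rfl,
                  List.map_map]
                refine List.map_congr_left ?_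
                intro p hp
                by_cases hpk : (p.1 == (r, s)) = true
                · simp [eq_of_beq hpk, pvMergeGroup_append v hv, hms]
                · have hp1 : p.1 ≠ (r, s) := fun h => hpk (by simp [h])
                  simp [hp1]
            · have hms : pvMergeStep (pvMergeGroup v) d hr
                  = pvMergeGroup v ++ (";" ++ d ++ ":" ++ hr) := by
                unfold pvMergeStep
                rw [if_neg hin]
                simp [String.append_assoc]
              rw [if_neg hin, PySem.Dict.items_insert_of_contains _ _ hci,
                show (pvImg g).items = g.items.map (fun p => (p.1, [pvMergeGroup p.2])) from rfl,
                List.map_map]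
              refine List.map_congr_left ?_
              intro p hp
              by_cases hpk : (p.1 == (r, s)) = true
              · simp [eq_of_beq hpk, pvMergeGroup_append v hv, hms]
              · have hp1 : p.1 ≠ (r, s) := fun h => hpk (by simp [h])
                simp [hp1]
      have hnd' : (pvStepB g (d, hr, z, s, r)).keys.Nodup :=
        PySem.Dict.nodup_keys_insert _ _ _ hnd
      have hne' : ∀ k v, (pvStepB g (d, hr, z, s, r)).get? k = some v → v ≠ [] := by
        intro k v hkv
        by_cases hk : k = (r, s)
        · subst hk
          rw [pvStepB, PySem.Dict.get?_insert_self] at hkv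
          obtain rfl := Option.some_inj.mp hkv.symm
          simp
        · rw [pvStepB, PySem.Dict.get?_insert_of_ne _ _ hk] at hkv
          exact hne _ _ hkv
      rw [List.foldl_cons, List.foldl_cons, hstep]
      exact ih _ hnd' hne'

-- ===== VERDICT (by name: the statement is the Claim_ definition above) =====
theorem getReasonSuggestMergeDate_spec : Claim_equal_getReasonSuggestMergeDate := by
  intro rows _
  unfold Spec_getReasonSuggestMergeDate getReasonSuggestMergeDate getReasonSuggestMergeDate_alt
  have h := pvMain rows PySem.Dict.empty (by simp [PySem.Dict.keys, PySem.Dict.empty]) (by intro k v hv; simp [PySem.Dict.empty] at hv; cases hv)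
  show (rows.foldl pvStepA (pvImg PySem.Dict.empty)).items.map _ = _
  rw [h]
  simp [pvImg, List.map_map]
  rfl
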